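-- pv_equiv track=rewrite | github.com/VYsv/CPP_Grader | Algorithm/mid/GAA.py | GAA
-- ===== SOURCE A (Python) =====
-- def GAA(n):
--     prev = 0; gaa = 3; k = 1
--     while gaa < n:
--         prev = gaa
--         gaa += 1 + 2 + k + gaa
--         k += 1
--     if prev+1 == n: return 'g'
--     if prev+1 < n <= prev+k+2: return 'a'
--     return GAA(n - prev - 2 - k)
-- ===== SOURCE B (Python) =====
-- def GAA(n):
--     # closed form: A's inner loop state after m steps is gaa = 2**(m+3)-m-5,
--     # prev = 2**(m+2)-m-4 (m>=1), k = m+1; B keeps only m and uses the formulas.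
--     while True:
--         m = 0
--         while 2 ** (m + 3) - m - 5 < n:
--             m += 1
--         lo = 2 ** (m + 2) - m - 3 if m else 1
--         if n == lo:
--             return 'g'
--         if lo < n <= lo + m + 2:
--             return 'a'
--         n -= lo + m + 2
-- ===== Notes on version B (the rewrite author's own statement) =====
-- stated objective: alternative
-- what changed: B replaces A's recursion threading the accumulating state (prev, gaa, k) by an iterative loop that keeps only the step count m and reconstructs the band boundaries from the closed form gaa_m = 2^(m+3)-m-5 of A's inner-loop state.
import Mathlib
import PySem

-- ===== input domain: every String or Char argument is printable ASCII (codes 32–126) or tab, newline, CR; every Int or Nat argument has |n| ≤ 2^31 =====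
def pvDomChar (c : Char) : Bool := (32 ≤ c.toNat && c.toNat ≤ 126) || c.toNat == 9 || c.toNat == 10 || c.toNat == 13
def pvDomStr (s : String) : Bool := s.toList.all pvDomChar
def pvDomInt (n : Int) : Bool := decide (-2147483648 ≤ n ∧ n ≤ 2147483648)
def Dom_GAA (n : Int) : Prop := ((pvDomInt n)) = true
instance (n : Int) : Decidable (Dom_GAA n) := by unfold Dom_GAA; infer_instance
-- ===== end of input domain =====

-- B keeps only the step count m of A's inner loop and recomputes the band
-- boundaries from the closed form of A's loop state; same result, different state.

-- ===== PORT A =====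
-- A's inner 'while gaa < n' loop: state (prev, gaa, k); fuel bounds the iterations
def GAAinner (fuel : Nat) (n prev gaa k : Int) : Int × Int × Int :=
  match fuel with
  | 0 => (prev, gaa, k)
  | f + 1 =>
    if gaa < n then GAAinner f n gaa (gaa + (1 + 2 + k + gaa)) (k + 1)
    else (prev, gaa, k)

-- A's tail recursion; fuel bounds the recursion depth (ample for n ≥ 1)
def GAAgo (fuel : Nat) (n : Int) : String :=
  match fuel with
  | 0 => ""
  | f + 1 =>
    match GAAinner (n.toNat + 1) n 0 3 1 with
    | (prev, _, k) =>
      if prev + 1 = n then "g"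
      else if prev + 1 < n ∧ n ≤ prev + k + 2 then "a"
      else GAAgo f (n - prev - 2 - k)

def GAA (n : Int) : String := GAAgo (n.toNat + 1) n

-- ===== PORT B =====
-- B's inner loop: find the first m with 2^(m+3) - m - 5 ≥ n
def GAAfindm (fuel : Nat) (n : Int) (m : Nat) : Nat :=
  match fuel with
  | 0 => m
  | f + 1 =>
    if (2 : Int) ^ (m + 3) - m - 5 < n then GAAfindm f n (m + 1)
    else m

-- B's outer 'while True' loop
def GAAaltgo (fuel : Nat) (n : Int) : String :=
  match fuel with
  | 0 => ""
  | f + 1 =>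
    let m := GAAfindm (n.toNat + 1) n 0
    let lo : Int := if m = 0 then 1 else (2 : Int) ^ (m + 2) - m - 3
    if n = lo then "g"
    else if lo < n ∧ n ≤ lo + m + 2 then "a"
    else GAAaltgo f (n - (lo + m + 2))

def GAA_alt (n : Int) : String := GAAaltgo (n.toNat + 1) n

-- ===== PRECONDITION & SPEC =====
-- Pre excludes n ≤ 0, on which Python A recurses forever (RecursionError) and B loops forever.
def Pre_GAA (n : Int) : Prop := 1 ≤ n
instance (n : Int) : Decidable (Pre_GAA n) := by unfold Pre_GAA; infer_instance
def pvWitness_GAA : Int := (7)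

def Spec_GAA (n : Int) (out : String) : Prop := out = GAA_alt n
instance (n : Int) (out : String) : Decidable (Spec_GAA n out) := by unfold Spec_GAA; infer_instance

-- ===== CLAIM (what is proved, stated in full; the proofs are below) =====
def Claim_equal_GAA : Prop := ∀ (n : Int), Dom_GAA n → Pre_GAA n → Spec_GAA n (GAA n)

-- ===== LEMMAS AND PROOFS =====

-- closed form of A's inner-loop gaa after j steps
def gclosed (j : Nat) : Int := 2 ^ (j + 3) - j - 5

lemma gclosed_succ (j : Nat) :
    gclosed j + (1 + 2 + ((j : Int) + 1) + gclosed j) = gclosed (j + 1) := by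
  simp only [gclosed]
  push_cast
  ring

-- A's inner loop, started at step j with the closed-form state, ends at step
-- M = GAAfindm fuel n j with the closed-form state (same fuel on both sides).
lemma bridge (fuel : Nat) : ∀ (n : Int) (j : Nat) (prev : Int),
    prev = (if j = 0 then 0 else gclosed (j - 1)) →
    GAAinner fuel n prev (gclosed j) ((j : Int) + 1)
      = ((if GAAfindm fuel n j = 0 then 0 else gclosed (GAAfindm fuel n j - 1)),
         gclosed (GAAfindm fuel n j), (GAAfindm fuel n j : Int) + 1) := by
  induction fuel with
  | zero => intro n j prev hp; simp [GAAinner, GAAfindm, hp]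
  | succ f ih =>
    intro n j prev hp
    by_cases h : gclosed j < n
    · have hc : (2 : Int) ^ (j + 3) - j - 5 < n := by simpa [gclosed] using h
      rw [show GAAfindm (f + 1) n j = GAAfindm f n (j + 1) by simp [GAAfindm, hc]]
      simp only [GAAinner, if_pos h]
      rw [gclosed_succ]
      have := ih n (j + 1) (gclosed j) (by simp)
      push_cast at this ⊢
      convert this using 3
    · have hc : ¬ (2 : Int) ^ (j + 3) - j - 5 < n := by simpa [gclosed] using h
      rw [show GAAfindm (f + 1) n j = j by simp [GAAfindm, hc]]
      simp [GAAinner, h, hp]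

-- the two outer loops agree for every fuel
lemma go_eq (fuel : Nat) : ∀ (n : Int), GAAgo fuel n = GAAaltgo fuel n := by
  induction fuel with
  | zero => intro n; rfl
  | succ f ih =>
    intro n
    have h3 : (3 : Int) = gclosed 0 := by norm_num [gclosed]
    have h1 : (1 : Int) = ((0 : Nat) : Int) + 1 := by norm_num
    have hb := bridge (n.toNat + 1) n 0 0 (by simp)
    set M := GAAfindm (n.toNat + 1) n 0 with hM
    set P : Int := (if M = 0 then 0 else gclosed (M - 1)) with hP
    have hinner : GAAinner (n.toNat + 1) n 0 3 1 = (P, gclosed M, (M : Int) + 1) := by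
      rw [h3, h1]; exact hb
    have hlo : (if M = 0 then (1 : Int) else (2 : Int) ^ (M + 2) - M - 3) = P + 1 := by
      rw [hP]
      rcases M with _ | m
      · norm_num
      · simp only [Nat.succ_ne_zero, if_false, Nat.add_sub_cancel, gclosed]
        push_cast
        ring
    simp only [GAAgo, GAAaltgo, hinner, ← hM, hlo]
    rw [show n - P - 2 - ((M : Int) + 1) = n - (P + 1 + (M : Int) + 2) by ring]
    exact if_congr eq_comm rfl
      (if_congr (and_congr_right fun _ => by constructor <;> intro <;> linarith)
        rfl (ih _))

-- ===== VERDICT (by name: the statement is the Claim_ definition above) =====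
theorem GAA_spec : Claim_equal_GAA := by
  intro n _ _
  unfold Spec_GAA GAA GAA_alt
  exact go_eq _ n
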